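-- pv_equiv track=rewrite | github.com/Zeuyel/ris_transform | core/paper_processor.py | parse_ris
-- ===== SOURCE A (Python) =====
-- from collections import defaultdict
--
-- def parse_ris(content):
--     """解析RIS文件内容，返回条目列表"""
--     entries = []
--     current_entry = defaultdict(list)
--
--     for line in content.split('\n'):
--         line = line.strip()
--         if not line:
--             continue
--
--         if line == 'ER  -':
--             if current_entry:
--                 current_entry['C1'] = []
--                 current_entry['C2'] = []
--                 current_entry['LB'] = []
--                 entries.append(dict(current_entry))
--                 current_entry = defaultdict(list)
--         elif len(line) > 6:
--             tag = line[:2]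
--             value = line[6:].strip()
--             current_entry[tag].append(value)
--
--     if current_entry:
--         current_entry['C1'] = []
--         current_entry['C2'] = []
--         current_entry['LB'] = []
--         entries.append(dict(current_entry))
--
--     return entries
-- ===== SOURCE B (Python) =====
-- def parse_ris(content):
--     """Parse RIS content: strip lines, group into records split at 'ER  -' markers, build each record's dict in one pass."""
--     lines = [l.strip() for l in content.split('\n')]
--     records = []
--     cur = []
--     for l in lines:
--         if l == 'ER  -':
--             records.append(cur)
--             cur = []
--         else:
--             cur.append(l)
--     records.append(cur)
--     entries = []
--     for rec in records:
--         d = {}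
--         for l in rec:
--             if len(l) > 6:
--                 d.setdefault(l[:2], []).append(l[6:].strip())
--         if d:
--             d['C1'] = []
--             d['C2'] = []
--             d['LB'] = []
--             entries.append(d)
--     return entries
-- ===== Notes on version B (the rewrite author's own statement) =====
-- stated objective: alternative
-- what changed: Instead of one stateful pass with a defaultdict accumulator flushed at end-of-record markers, B first strips all lines and splits them into records at the marker lines, then builds each record's dict in a separate pass and keeps only non-empty ones.
import Mathlib
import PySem

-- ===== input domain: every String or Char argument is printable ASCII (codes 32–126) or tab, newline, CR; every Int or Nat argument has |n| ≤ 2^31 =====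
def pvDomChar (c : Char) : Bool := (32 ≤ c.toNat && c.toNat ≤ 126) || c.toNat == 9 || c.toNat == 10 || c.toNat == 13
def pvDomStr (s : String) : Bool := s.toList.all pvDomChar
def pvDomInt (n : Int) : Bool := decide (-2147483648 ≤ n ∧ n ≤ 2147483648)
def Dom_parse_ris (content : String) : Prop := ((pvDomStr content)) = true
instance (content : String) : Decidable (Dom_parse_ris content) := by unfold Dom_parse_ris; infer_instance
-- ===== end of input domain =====

-- B replaces A's single stateful defaultdict loop by grouping stripped lines into records at the
-- end-of-record marker and building each record's dict separately (alternative decomposition, same cost).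

-- ===== PORT A =====
-- the repeated 'C1/C2/LB := []; entries.append(dict(current_entry))' block of A
def pvFinishA (es : List (List (String × List String))) (d : PySem.Dict String (List String)) :
    List (List (String × List String)) :=
  es ++ [(((d.insert "C1" []).insert "C2" []).insert "LB" []).items]

def parse_ris_step (st : List (List (String × List String)) × PySem.Dict String (List String))
    (ln : String) : List (List (String × List String)) × PySem.Dict String (List String) :=
  let line := PySem.Str.strip ln
  if line = "" then st
  else if line = "ER  -" then
    (if st.2.size ≠ 0 then (pvFinishA st.1 st.2, PySem.Dict.empty) else st)
  else if 6 < PySem.Str.len line then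
    (st.1, st.2.modify (PySem.Str.slice line none (some 2)) []
      (· ++ [PySem.Str.strip (PySem.Str.slice line (some 6) none)]))
  else st

def parse_ris (content : String) : List (List (String × List String)) :=
  let fin := ((PySem.Str.split? content "\n").getD []).foldl parse_ris_step ([], PySem.Dict.empty)
  if fin.2.size ≠ 0 then pvFinishA fin.1 fin.2 else fin.1

-- ===== PORT B =====
-- d.setdefault(l[:2], []).append(l[6:].strip()) for a tag line, else unchanged
def pvTagLine (d : PySem.Dict String (List String)) (l : String) : PySem.Dict String (List String) :=
  if 6 < PySem.Str.len l then
    d.modify (PySem.Str.slice l none (some 2)) []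
      (· ++ [PySem.Str.strip (PySem.Str.slice l (some 6) none)])
  else d

def pvBuild (rec : List String) : PySem.Dict String (List String) :=
  rec.foldl pvTagLine PySem.Dict.empty

-- 'if d: d[C1]=d[C2]=d[LB]=[]; entries.append(d)'
def pvEmit (es : List (List (String × List String))) (d : PySem.Dict String (List String)) :
    List (List (String × List String)) :=
  if d.size ≠ 0 then es ++ [(((d.insert "C1" []).insert "C2" []).insert "LB" []).items] else es

def pvGroup (st : List (List String) × List String) (l : String) : List (List String) × List String :=
  if l = "ER  -" then (st.1 ++ [st.2], []) else (st.1, st.2 ++ [l])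

def parse_ris_alt (content : String) : List (List (String × List String)) :=
  let lines := ((PySem.Str.split? content "\n").getD []).map PySem.Str.strip
  let g := lines.foldl pvGroup ([], [])
  (g.1 ++ [g.2]).foldl (fun es rec => pvEmit es (pvBuild rec)) []

-- ===== PRECONDITION & SPEC =====
def Spec_parse_ris (content : String) (out : List (List (String × List String))) : Prop := out = parse_ris_alt content
instance (content : String) (out : List (List (String × List String))) : Decidable (Spec_parse_ris content out) := by unfold Spec_parse_ris; infer_instance

-- ===== CLAIM (what is proved, stated in full; the proofs are below) =====
def Claim_equal_parse_ris : Prop := ∀ (content : String), Dom_parse_ris content → Spec_parse_ris content (parse_ris content)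

-- ===== LEMMAS AND PROOFS =====

-- record-by-record processing, threading the dict only into the first record
def pvProcD : List (List String) → List (List (String × List String)) →
    PySem.Dict String (List String) → List (List (String × List String))
  | [], es, _ => es
  | r :: rs, es, d => pvProcD rs (pvEmit es (r.foldl pvTagLine d)) PySem.Dict.empty

-- A's trailing flush, as a function of the loop state
def pvFinWrap (p : List (List (String × List String)) × PySem.Dict String (List String)) :
    List (List (String × List String)) :=
  if p.2.size ≠ 0 then pvFinishA p.1 p.2 else p.1

lemma pvTagLine_empty (d : PySem.Dict String (List String)) : pvTagLine d "" = d := by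
  simp [pvTagLine, PySem.Str.len]

lemma stepA_marker (st : List (List (String × List String)) × PySem.Dict String (List String))
    (l : String) (hm : PySem.Str.strip l = "ER  -") :
    parse_ris_step st l
      = if st.2.size ≠ 0 then (pvFinishA st.1 st.2, PySem.Dict.empty) else st := by
  simp [parse_ris_step, hm]

lemma stepA_other (es : List (List (String × List String)))
    (d : PySem.Dict String (List String)) (l : String) (hm : PySem.Str.strip l ≠ "ER  -") :
    parse_ris_step (es, d) l = (es, pvTagLine d (PySem.Str.strip l)) := by
  by_cases he : PySem.Str.strip l = ""
  · simp [parse_ris_step, he, pvTagLine_empty]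
  · simp only [parse_ris_step, if_neg he, if_neg hm, pvTagLine]
    split_ifs <;> rfl

lemma pvEmit_eq_finishA (es : List (List (String × List String)))
    (d : PySem.Dict String (List String)) (h : d.size ≠ 0) : pvEmit es d = pvFinishA es d := by
  simp [pvEmit, pvFinishA, h]

lemma size_zero_eq_empty (d : PySem.Dict String (List String)) (h : ¬ d.size ≠ 0) :
    d = PySem.Dict.empty := by
  apply PySem.Dict.ext
  have : d.items.length = 0 := by simpa [PySem.Dict.size] using h
  simpa [PySem.Dict.empty] using List.length_eq_zero_iff.mp this

lemma group_prefix (ls : List String) (rs0 rs : List (List String)) (c : List String) :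
    ls.foldl pvGroup (rs0 ++ rs, c)
      = (rs0 ++ (ls.foldl pvGroup (rs, c)).1, (ls.foldl pvGroup (rs, c)).2) := by
  induction ls generalizing rs c with
  | nil => simp
  | cons l ls ih =>
    by_cases h : l = "ER  -"
    · simp only [List.foldl_cons, pvGroup, if_pos h]
      rw [show rs0 ++ rs ++ [c] = rs0 ++ (rs ++ [c]) by simp, ih]
    · simp only [List.foldl_cons, pvGroup, if_neg h, ih]

lemma procD_empty (rs : List (List String)) (es : List (List (String × List String))) :
    pvProcD rs es PySem.Dict.empty = rs.foldl (fun es rec => pvEmit es (pvBuild rec)) es := by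
  induction rs generalizing es with
  | nil => rfl
  | cons r rs ih => simp [pvProcD, pvBuild, ih]

lemma main_lemma (ls : List String) (es : List (List (String × List String)))
    (d : PySem.Dict String (List String)) (c : List String) :
    pvFinWrap (ls.foldl parse_ris_step (es, c.foldl pvTagLine d))
    = pvProcD (((ls.map PySem.Str.strip).foldl pvGroup ([], c)).1
        ++ [((ls.map PySem.Str.strip).foldl pvGroup ([], c)).2]) es d := by
  induction ls generalizing es d c with
  | nil =>
    rfl
  | cons l ls ih =>
    simp only [List.foldl_cons, List.map_cons]
    by_cases hm : PySem.Str.strip l = "ER  -"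
    · rw [stepA_marker _ l hm]
      simp only [pvGroup, if_pos hm, List.nil_append]
      rw [show ([c] : List (List String)) = [c] ++ [] by simp,
        group_prefix (ls.map PySem.Str.strip) [c] [] []]
      simp only [List.cons_append, List.nil_append, pvProcD]
      by_cases hz : (c.foldl pvTagLine d).size ≠ 0
      · rw [if_pos hz, ← pvEmit_eq_finishA es _ hz]
        have := ih (pvEmit es (c.foldl pvTagLine d)) PySem.Dict.empty []
        simpa using this
      · rw [if_neg hz]
        have hd : c.foldl pvTagLine d = PySem.Dict.empty := size_zero_eq_empty _ hz
        have hv : pvEmit es (c.foldl pvTagLine d) = es := by simp [pvEmit, hz]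
        rw [hv, hd]
        have := ih es PySem.Dict.empty []
        simpa using this
    · rw [stepA_other es _ l hm]
      simp only [pvGroup, if_neg hm]
      have harg : pvTagLine (c.foldl pvTagLine d) (PySem.Str.strip l)
          = (c ++ [PySem.Str.strip l]).foldl pvTagLine d := by
        simp [List.foldl_append]
      rw [harg]
      exact ih es d (c ++ [PySem.Str.strip l])

-- ===== VERDICT (by name: the statement is the Claim_ definition above) =====
theorem parse_ris_spec : Claim_equal_parse_ris := by
  intro content _
  unfold Spec_parse_ris
  have h := main_lemma ((PySem.Str.split? content "\n").getD []) [] PySem.Dict.empty []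
  simp only [List.foldl_nil] at h
  rw [procD_empty] at h
  exact h
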